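-- pv_equiv track=rewrite | github.com/theyve-g/advent_of_code | aoc/two/two.py | get_invalid_ids
-- ===== SOURCE A (Python) =====
-- from collections import deque
-- from math import floor
--
-- def get_digits(number: int):
--     digits: deque[int] = deque([])
--     while number > 0:
--         number, digit = number // 10, number % 10
--         digits.appendleft(digit)
--
--     return digits
--
-- def construct(digits: deque[int] | list):
--     number = 0
--     multiplier = 1
--     index = len(digits) - 1
--     while index >= 0:
--         digit = digits[index]
--         number += multiplier * digit
--
--         multiplier *= 10
--         index -= 1
--
--     return number
--
-- def get_invalid_ids(min_val: int, max_val: int):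
--     invalid_ids: list[int] = []
--
--     digits = get_digits(min_val)
--     pos = floor(len(digits) / 2)
--
--     left = construct(list(digits)[:pos])
--     multiplier = 10**pos
--
--     number = left * multiplier + left
--
--     while number <= max_val:
--         if number >= min_val:
--             invalid_ids.append(number)
--
--         left += 1
--         if left == multiplier:
--             multiplier *= 10
--
--         number = left * multiplier + left
--
--     return invalid_ids
-- ===== SOURCE B (Python) =====
-- def get_invalid_ids(min_val, max_val):
--     # Closed-form per-half-length enumeration: every self-concatenated id with a
--     # d-digit half L equals L * (10**d + 1); compute the L-range by division.
--     invalid_ids = [0] if min_val <= 0 <= max_val else []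
--     d = 1
--     while 10 ** (d - 1) * (10 ** d + 1) <= max_val:
--         factor = 10 ** d + 1
--         low = max(10 ** (d - 1), -(-min_val // factor))
--         high = min(10 ** d - 1, max_val // factor)
--         invalid_ids.extend(left * factor for left in range(low, high + 1))
--         d += 1
--     return invalid_ids
-- ===== Notes on version B (the rewrite author's own statement) =====
-- stated objective: faster
-- what changed: Replaces the digit-deque prefix construction and the increment-with-carry while loop over successive left halves by a closed-form per-half-length enumeration: for each half-length d the valid left-half range is computed by ceiling/floor division by 10^d+1 and emitted as one range, with 0 prepended exactly when min_val <= 0 <= max_val.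
import Mathlib
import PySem

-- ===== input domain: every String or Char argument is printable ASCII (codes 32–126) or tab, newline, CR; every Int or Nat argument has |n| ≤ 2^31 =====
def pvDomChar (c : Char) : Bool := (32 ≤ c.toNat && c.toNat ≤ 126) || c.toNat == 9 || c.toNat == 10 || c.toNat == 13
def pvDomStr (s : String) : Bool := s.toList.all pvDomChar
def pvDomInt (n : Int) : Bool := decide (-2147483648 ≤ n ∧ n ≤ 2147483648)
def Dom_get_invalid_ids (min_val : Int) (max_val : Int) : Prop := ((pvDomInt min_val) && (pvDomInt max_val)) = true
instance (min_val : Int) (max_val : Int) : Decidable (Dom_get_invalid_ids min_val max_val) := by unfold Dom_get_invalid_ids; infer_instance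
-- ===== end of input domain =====

-- B replaces A's digit-deque prefix construction and increment-with-carry loop by a
-- closed-form per-half-length enumeration whose left-half bounds come from division
-- (objective: faster, constant factor).

-- ===== PORT A =====

-- get_digits: the while loop appendlefts number % 10, so the deque lists the decimal
-- digits most-significant first; the structural recursion below builds the same list.
def get_digitsA (number : Int) : List Int :=
  if h : 0 < number then
    get_digitsA (PySem.Int.floordiv number 10) ++ [PySem.Int.mod number 10]
  else []
termination_by number.toNat
decreasing_by
  rw [PySem.Int.floordiv_eq_ediv_of_pos (by decide : (0:Int) < 10)]
  have h1 : number / 10 * 10 ≤ number := Int.ediv_mul_le number (by decide)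
  have hq : number / 10 < number := by
    by_contra hc
    have hle : number ≤ number / 10 := Int.not_lt.mp hc
    have h3 : number * 10 ≤ number / 10 * 10 := mul_le_mul_of_nonneg_right hle (by decide)
    linarith
  exact (Int.toNat_lt_toNat h).2 hq

-- construct: the index-descending while loop (index = len-1 … 0) reads the digits in
-- reverse order, accumulating number += multiplier * digit, multiplier *= 10; the
-- helper below traverses digits.reverse carrying the same (number, multiplier) state.
def constructGo : List Int → Int → Int → Int
  | [], number, _multiplier => number
  | d :: rest, number, multiplier => constructGo rest (number + multiplier * d) (multiplier * 10)

def constructA (digits : List Int) : Int := constructGo digits.reverse 0 1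

-- lemmas the port itself cites (nonnegativity of the loop state, for termination):
theorem get_digitsA_nonneg (number : Int) : ∀ d ∈ get_digitsA number, 0 ≤ d := by
  intro d hd
  induction number using get_digitsA.induct with
  | case1 n h ih =>
    rw [get_digitsA, dif_pos h] at hd
    rcases List.mem_append.1 hd with h' | h'
    · exact ih h'
    · simp only [List.mem_singleton] at h'
      subst h'
      exact PySem.Int.mod_nonneg _ (by norm_num)
  | case2 n h => rw [get_digitsA, dif_neg h] at hd; simp at hd

theorem constructGo_nonneg : ∀ (l : List Int), (∀ d ∈ l, 0 ≤ d) → ∀ n m : Int, 0 ≤ n → 0 ≤ m → 0 ≤ constructGo l n m := by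
  intro l
  induction l with
  | nil => intro _ n m hn _; simpa [constructGo] using hn
  | cons d t ih =>
    intro hl n m hn hm
    exact ih (fun x hx => hl x (List.mem_cons_of_mem _ hx)) _ _
      (by have := hl d (List.mem_cons_self); positivity) (by positivity)

theorem constructA_nonneg (digits : List Int) (h : ∀ d ∈ digits, 0 ≤ d) : 0 ≤ constructA digits :=
  constructGo_nonneg _ (fun d hd => h d (List.mem_reverse.1 hd)) 0 1 le_rfl zero_le_one

-- the main while loop of get_invalid_ids; the two Prop arguments record that the
-- Python loop state is a nonnegative left half and a positive power-of-ten multiplier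
-- (always true along A's execution), which is what makes `number` strictly increase.
def loopA (min_val max_val : Int) (invalid_ids : List Int) (left multiplier : Int)
    (hl : 0 ≤ left) (hm : 1 ≤ multiplier) : List Int :=
  if h : left * multiplier + left ≤ max_val then
    loopA min_val max_val
      (if min_val ≤ left * multiplier + left then invalid_ids ++ [left * multiplier + left] else invalid_ids)
      (left + 1)
      (if left + 1 = multiplier then multiplier * 10 else multiplier)
      (add_nonneg hl zero_le_one)
      (by
        split
        · exact le_trans hm (le_mul_of_one_le_right (le_trans zero_le_one hm) (by decide))
        · exact hm)
  else invalid_ids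
termination_by (max_val + 1 - (left * multiplier + left)).toNat
decreasing_by
  have hge : multiplier ≤ (if left + 1 = multiplier then multiplier * 10 else multiplier) := by
    split
    · exact le_mul_of_one_le_right (le_trans zero_le_one hm) (by decide)
    · exact le_rfl
  have hk1 : left * multiplier ≤
      left * (if left + 1 = multiplier then multiplier * 10 else multiplier) :=
    mul_le_mul_of_nonneg_left hge hl
  have hk2 : (left + 1) * (if left + 1 = multiplier then multiplier * 10 else multiplier) =
      left * (if left + 1 = multiplier then multiplier * 10 else multiplier) +
        (if left + 1 = multiplier then multiplier * 10 else multiplier) :=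
    add_one_mul left _
  have hm1 : 1 ≤ (if left + 1 = multiplier then multiplier * 10 else multiplier) :=
    le_trans hm hge
  have hlt : left * multiplier + left <
      (left + 1) * (if left + 1 = multiplier then multiplier * 10 else multiplier) + (left + 1) := by
    rw [hk2, add_assoc]
    exact lt_of_le_of_lt (Int.add_le_add_right hk1 left)
      (Int.add_lt_add_left
        (lt_of_lt_of_le (lt_add_one left) (le_add_of_nonneg_left (le_trans zero_le_one hm1)))
        (left * (if left + 1 = multiplier then multiplier * 10 else multiplier)))
  have hbpos : 0 < max_val + 1 - (left * multiplier + left) :=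
    Int.sub_pos.mpr (Int.lt_add_one_iff.mpr h)
  exact (Int.toNat_lt_toNat hbpos).2 (sub_lt_sub_left hlt (max_val + 1))

def get_invalid_ids (min_val : Int) (max_val : Int) : List Int :=
  let digits := get_digitsA min_val
  let pos := digits.length / 2          -- floor(len(digits) / 2)
  let left := constructA (digits.take pos)   -- construct(list(digits)[:pos])
  let multiplier := (10:Int) ^ pos
  loopA min_val max_val [] left multiplier
    (constructA_nonneg _ (fun d hd => get_digitsA_nonneg min_val d (List.mem_of_mem_take hd)))
    (one_le_pow₀ (by norm_num))

-- ===== PORT B =====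

-- lemma the loop below cites for termination: the smallest concat of half-length d
-- grows strictly with d.
theorem gB_strict (d : Nat) (hd : 1 ≤ d) :
    (10:Int) ^ (d - 1) * (10 ^ d + 1) < 10 ^ ((d+1) - 1) * (10 ^ (d+1) + 1) := by
  rw [Nat.add_sub_cancel]
  have hb : (0:Int) < 10 ^ d := pow_pos (by decide) d
  calc (10:Int) ^ (d - 1) * (10 ^ d + 1)
      ≤ 10 ^ d * (10 ^ d + 1) :=
        mul_le_mul_of_nonneg_right (pow_le_pow_right₀ (by decide : (1:Int) ≤ 10) (Nat.sub_le d 1))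
          (le_of_lt (add_pos hb one_pos))
    _ < 10 ^ d * (10 ^ (d + 1) + 1) :=
        mul_lt_mul_of_pos_left
          (Int.add_lt_add_right (pow_lt_pow_right₀ (by decide : (1:Int) < 10) (Nat.lt_succ_self d)) 1) hb

def loopB (min_val max_val : Int) (invalid_ids : List Int) (d : Nat) (hd : 1 ≤ d) : List Int :=
  if h : (10:Int) ^ (d - 1) * (10 ^ d + 1) ≤ max_val then
    loopB min_val max_val
      (invalid_ids ++
        (PySem.List.pyRange
            (max ((10:Int) ^ (d - 1)) (-(PySem.Int.floordiv (-min_val) (10 ^ d + 1))))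
            (min ((10:Int) ^ d - 1) (PySem.Int.floordiv max_val (10 ^ d + 1)) + 1) 1).map
          (fun left => left * (10 ^ d + 1)))
      (d + 1) (Nat.le_add_left 1 d)
  else invalid_ids
termination_by (max_val + 1 - (10:Int) ^ (d - 1) * (10 ^ d + 1)).toNat
decreasing_by
  have hbpos : 0 < max_val + 1 - (10:Int) ^ (d - 1) * (10 ^ d + 1) :=
    Int.sub_pos.mpr (Int.lt_add_one_iff.mpr h)
  exact (Int.toNat_lt_toNat hbpos).2 (sub_lt_sub_left (gB_strict d hd) (max_val + 1))

def get_invalid_ids_alt (min_val : Int) (max_val : Int) : List Int :=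
  loopB min_val max_val (if min_val ≤ 0 ∧ 0 ≤ max_val then [0] else []) 1 le_rfl

-- ===== PRECONDITION & SPEC =====
def Spec_get_invalid_ids (min_val : Int) (max_val : Int) (out : List Int) : Prop := out = get_invalid_ids_alt min_val max_val
instance (min_val : Int) (max_val : Int) (out : List Int) : Decidable (Spec_get_invalid_ids min_val max_val out) := by unfold Spec_get_invalid_ids; infer_instance

-- ===== CLAIM (what is proved, stated in full; the proofs are below) =====
def Claim_equal_get_invalid_ids : Prop := ∀ (min_val : Int) (max_val : Int), Dom_get_invalid_ids min_val max_val → Spec_get_invalid_ids min_val max_val (get_invalid_ids min_val max_val)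

-- ===== LEMMAS AND PROOFS =====

-- Both programs are shown to equal the canonical enumeration `Sfil min_val max_val 0`:
-- the increasing list of all self-concatenated values fN L = L·10^(digits L) + L,
-- L = 0, 1, 2, …, cut off above max_val and filtered to those ≥ min_val.

-- number of decimal digits (0 for 0)
def ndP (n : Nat) : Nat :=
  if h : n = 0 then 0 else ndP (n / 10) + 1
termination_by n
decreasing_by exact Nat.div_lt_self (Nat.pos_of_ne_zero h) (by norm_num)

-- the self-concatenation of L
def fN (L : Nat) : Nat := L * 10 ^ ndP L + L

theorem ndP_zero : ndP 0 = 0 := by rw [ndP]; rfl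

theorem ndP_pos_eq (n : Nat) (h : n ≠ 0) : ndP n = ndP (n / 10) + 1 := by
  rw [ndP, dif_neg h]

theorem ndP_bounds (n : Nat) (h : 1 ≤ n) : 10 ^ (ndP n - 1) ≤ n ∧ n < 10 ^ ndP n := by
  induction n using Nat.strong_induction_on with
  | _ n ih =>
    rw [ndP_pos_eq n (by omega)]
    by_cases h10 : n < 10
    · have : n / 10 = 0 := Nat.div_eq_of_lt h10
      rw [this, ndP_zero]
      simpa using ⟨h, h10⟩
    · have hq : 1 ≤ n / 10 := Nat.one_le_div_iff (by norm_num) |>.2 (by omega)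
      obtain ⟨b1, b2⟩ := ih (n / 10) (Nat.div_lt_self (by omega) (by norm_num)) hq
      have hk : 1 ≤ ndP (n / 10) := by
        by_contra hc
        have : ndP (n / 10) = 0 := by omega
        rw [this] at b2; omega
      constructor
      · have : 10 ^ (ndP (n / 10) + 1 - 1) = 10 ^ (ndP (n / 10) - 1) * 10 := by
          rw [Nat.add_sub_cancel, ← pow_succ]
          congr 1
          omega
        rw [this]
        calc 10 ^ (ndP (n / 10) - 1) * 10 ≤ (n / 10) * 10 := by
              exact Nat.mul_le_mul_right _ b1
          _ ≤ n := Nat.div_mul_le_self n 10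
      · have hlt10 : n < (n / 10) * 10 + 10 := by omega
        calc n < (n / 10) * 10 + 10 := hlt10
          _ ≤ (10 ^ ndP (n / 10) - 1) * 10 + 10 := by
              have : n / 10 ≤ 10 ^ ndP (n / 10) - 1 := by omega
              exact Nat.add_le_add_right (Nat.mul_le_mul_right _ this) _
          _ ≤ 10 ^ (ndP (n / 10) + 1) := by
              rw [pow_succ]
              have : 1 ≤ 10 ^ ndP (n / 10) := Nat.one_le_pow _ _ (by norm_num)
              omega

theorem ndP_eq_of_bounds (n k : Nat) (h1 : 10 ^ k ≤ n) (h2 : n < 10 ^ (k + 1)) :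
    ndP n = k + 1 := by
  have hn : 1 ≤ n := le_trans (Nat.one_le_pow _ _ (by norm_num)) h1
  obtain ⟨b1, b2⟩ := ndP_bounds n hn
  have hnd : 1 ≤ ndP n := by
    by_contra hc
    have : ndP n = 0 := by omega
    rw [this] at b2; omega
  by_contra hne
  rcases Nat.lt_or_ge (ndP n) (k + 1) with hlt | hge
  · have : 10 ^ ndP n ≤ 10 ^ k := Nat.pow_le_pow_right (by norm_num) (by omega)
    omega
  · have : 10 ^ (k + 1) ≤ 10 ^ (ndP n - 1) := Nat.pow_le_pow_right (by norm_num) (by omega)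
    omega

theorem ndP_succ_carry (L : Nat) (h : L + 1 = 10 ^ ndP L) : ndP (L + 1) = ndP L + 1 := by
  apply ndP_eq_of_bounds
  · omega
  · have : 10 ^ ndP L < 10 ^ (ndP L + 1) :=
      Nat.pow_lt_pow_right (by norm_num) (by omega)
    omega

theorem ndP_succ_nocarry (L : Nat) (h : L + 1 ≠ 10 ^ ndP L) : ndP (L + 1) = ndP L := by
  rcases Nat.eq_zero_or_pos L with hz | hp
  · subst hz
    rw [ndP_zero] at h
    simp at h
  · obtain ⟨b1, b2⟩ := ndP_bounds L hp
    have hnd : 1 ≤ ndP L := by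
      by_contra hc
      have : ndP L = 0 := by omega
      rw [this] at b2; omega
    have := ndP_eq_of_bounds (L + 1) (ndP L - 1) (by omega)
      (by rw [Nat.sub_add_cancel hnd]; omega)
    omega

theorem ndP_succ_ge (L : Nat) : ndP L ≤ ndP (L + 1) := by
  by_cases h : L + 1 = 10 ^ ndP L
  · rw [ndP_succ_carry L h]; omega
  · rw [ndP_succ_nocarry L h]

theorem fN_lt_succ (L : Nat) : fN L < fN (L + 1) := by
  unfold fN
  have h1 : 10 ^ ndP L ≤ 10 ^ ndP (L + 1) :=
    Nat.pow_le_pow_right (by norm_num) (ndP_succ_ge L)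
  have h2 : L * 10 ^ ndP L ≤ L * 10 ^ ndP (L + 1) := Nat.mul_le_mul_left _ h1
  have h3 : L * 10 ^ ndP (L + 1) < (L + 1) * 10 ^ ndP (L + 1) :=
    Nat.mul_lt_mul_of_lt_of_le (by omega) le_rfl (Nat.pow_pos (by norm_num))
  omega

theorem fN_mono (L M : Nat) (h : L ≤ M) : fN L ≤ fN M := by
  induction M with
  | zero =>
    have : L = 0 := by omega
    subst this
    exact le_rfl
  | succ m ih =>
    rcases Nat.lt_or_ge L (m + 1) with hlt | hge
    · exact le_trans (ih (by omega)) (le_of_lt (fN_lt_succ m))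
    · have : L = m + 1 := by omega
      subst this
      exact le_rfl

-- canonical enumeration: concats from L upward, cut off above max_val
def concatS (max_val : Int) (L : Nat) : List Int :=
  if (fN L : Int) ≤ max_val then (fN L : Int) :: concatS max_val (L + 1) else []
termination_by (max_val + 1 - (fN L : Int)).toNat
decreasing_by
  have := fN_lt_succ L
  have h2 : (fN L : Int) < (fN (L + 1) : Int) := by exact_mod_cast this
  omega

def Sfil (min_val max_val : Int) (L : Nat) : List Int :=
  (concatS max_val L).filter (fun x => decide (min_val ≤ x))

-- === A-side characterization ===

theorem loopA_congr (min_val max_val : Int) (acc : List Int) (l1 m1 l2 m2 : Int)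
    (hl1 : 0 ≤ l1) (hm1 : 1 ≤ m1) (he1 : l1 = l2) (he2 : m1 = m2) :
    loopA min_val max_val acc l1 m1 hl1 hm1 =
      loopA min_val max_val acc l2 m2 (he1 ▸ hl1) (he2 ▸ hm1) := by
  subst he1; subst he2; rfl

theorem mult_update (L : Nat) :
    (if ((L : Int) + 1) = 10 ^ ndP L then (10:Int) ^ ndP L * 10 else 10 ^ ndP L) =
      10 ^ ndP (L + 1) := by
  by_cases h : L + 1 = 10 ^ ndP L
  · rw [if_pos (by exact_mod_cast congrArg (Nat.cast : Nat → Int) h), ndP_succ_carry L h, pow_succ]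
  · rw [if_neg (by exact_mod_cast fun hc => h (by exact_mod_cast hc)), ndP_succ_nocarry L h]

theorem Sfil_cons (min_val max_val : Int) (L : Nat) (h : (fN L : Int) ≤ max_val) :
    Sfil min_val max_val L =
      (if min_val ≤ (fN L : Int) then [(fN L : Int)] else []) ++ Sfil min_val max_val (L + 1) := by
  unfold Sfil
  conv_lhs => rw [concatS]
  rw [if_pos h, List.filter_cons]
  simp only [decide_eq_true_eq]
  split <;> simp

theorem Sfil_nil (min_val max_val : Int) (L : Nat) (h : ¬ (fN L : Int) ≤ max_val) :
    Sfil min_val max_val L = [] := by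
  unfold Sfil
  rw [concatS, if_neg h]
  rfl

theorem loopA_char (min_val max_val : Int) :
    ∀ (k : Nat) (L : Nat) (acc : List Int) (hl : 0 ≤ ((L : Nat) : Int))
      (hm : 1 ≤ (10:Int) ^ ndP L),
      (max_val + 1 - (fN L : Int)).toNat ≤ k →
      loopA min_val max_val acc (L : Int) ((10:Int) ^ ndP L) hl hm =
        acc ++ Sfil min_val max_val L := by
  intro k
  induction k with
  | zero =>
    intro L acc hl hm hk
    have hfe : ((fN L : Nat) : Int) = (L : Int) * (10:Int) ^ ndP L + (L : Int) := by
      unfold fN; push_cast; ring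
    have hgt : ¬ ((L : Int) * (10:Int) ^ ndP L + (L : Int) ≤ max_val) := by
      rw [← hfe]; omega
    rw [loopA, dif_neg hgt, Sfil_nil min_val max_val L (by rw [hfe]; exact hgt)]
    simp
  | succ k ih =>
    intro L acc hl hm hk
    have hfe : ((fN L : Nat) : Int) = (L : Int) * (10:Int) ^ ndP L + (L : Int) := by
      unfold fN; push_cast; ring
    by_cases hle : (L : Int) * (10:Int) ^ ndP L + (L : Int) ≤ max_val
    · rw [loopA, dif_pos hle]
      rw [loopA_congr min_val max_val _ ((L : Int) + 1) _ ((L + 1 : Nat) : Int)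
            ((10:Int) ^ ndP (L + 1)) (by omega) (by split <;> omega)
            (by push_cast; ring) (mult_update L)]
      rw [ih (L + 1) _ (by positivity) (one_le_pow₀ (by norm_num))
            (by
              have hstep := fN_lt_succ L
              have hc : (fN L : Int) < (fN (L + 1) : Int) := by exact_mod_cast hstep
              omega)]
      rw [Sfil_cons min_val max_val L (by rw [hfe]; exact hle), ← hfe]
      split <;> simp
    · rw [loopA, dif_neg hle, Sfil_nil min_val max_val L (by rw [hfe]; exact hle)]
      simp

theorem constructGo_linear (l : List Int) :
    ∀ n m : Int, constructGo l n m = n + m * constructGo l 0 1 := by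
  induction l with
  | nil => intro n m; simp [constructGo]
  | cons d t ih =>
    intro n m
    rw [constructGo, constructGo, ih (n + m * d), ih (0 + 1 * d)]
    ring

theorem constructA_append (l : List Int) (x : Int) :
    constructA (l ++ [x]) = constructA l * 10 + x := by
  unfold constructA
  rw [List.reverse_append, List.reverse_singleton, List.singleton_append, constructGo,
    constructGo_linear l.reverse (0 + 1 * x) (1 * 10),
    constructGo_linear l.reverse 0 1]
  ring

theorem digitsA_step (n : Nat) (h : 1 ≤ n) :
    get_digitsA (n : Int) = get_digitsA ((n / 10 : Nat) : Int) ++ [((n % 10 : Nat) : Int)] := by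
  rw [get_digitsA, dif_pos (by exact_mod_cast h : (0:Int) < (n : Int))]
  rw [show PySem.Int.floordiv (n : Int) 10 = ((n / 10 : Nat) : Int) from
        by exact_mod_cast PySem.Int.floordiv_natCast n 10,
      show PySem.Int.mod (n : Int) 10 = ((n % 10 : Nat) : Int) from
        by exact_mod_cast PySem.Int.mod_natCast n 10]

theorem digitsA_zero_of_nonpos (m : Int) (h : m ≤ 0) : get_digitsA m = [] := by
  rw [get_digitsA, dif_neg (by omega)]

theorem digitsA_length (n : Nat) : (get_digitsA (n : Int)).length = ndP n := by
  induction n using Nat.strong_induction_on with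
  | _ n ih =>
    rcases Nat.eq_zero_or_pos n with hz | hp
    · subst hz
      rw [show ((0:Nat):Int) = 0 from rfl, digitsA_zero_of_nonpos 0 le_rfl, ndP_zero]
      rfl
    · rw [digitsA_step n hp, List.length_append, ndP_pos_eq n (by omega),
        ih (n / 10) (Nat.div_lt_self hp (by norm_num))]
      rfl

theorem digitsA_take (n : Nat) : ∀ p ≤ ndP n,
    (get_digitsA (n : Int)).take p = get_digitsA ((n / 10 ^ (ndP n - p) : Nat) : Int) := by
  induction n using Nat.strong_induction_on with
  | _ n ih =>
    intro p hp
    rcases Nat.eq_zero_or_pos n with hz | hp0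
    · subst hz
      rw [ndP_zero] at hp
      have : p = 0 := by omega
      subst this
      simp only [List.take_zero, Nat.zero_div]
      exact (digitsA_zero_of_nonpos 0 le_rfl).symm
    · rcases Nat.lt_or_ge p (ndP n) with hlt | hge
      · have hstep := digitsA_step n hp0
        have hlen : (get_digitsA ((n / 10 : Nat) : Int)).length = ndP (n / 10) :=
          digitsA_length (n / 10)
        have hnd : ndP n = ndP (n / 10) + 1 := ndP_pos_eq n (by omega)
        have hexp : ndP n - p = (ndP (n / 10) - p) + 1 := by omega
        rw [hstep, List.take_append_of_le_length (by omega),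
          ih (n / 10) (Nat.div_lt_self hp0 (by norm_num)) p (by omega),
          Nat.div_div_eq_div_mul, hexp, pow_succ']
      · have hpe : p = ndP n := by omega
        subst hpe
        rw [List.take_of_length_le (by rw [digitsA_length]), Nat.sub_self, pow_zero,
          Nat.div_one]

theorem constructA_digits (n : Nat) : constructA (get_digitsA (n : Int)) = (n : Int) := by
  induction n using Nat.strong_induction_on with
  | _ n ih =>
    rcases Nat.eq_zero_or_pos n with hz | hp
    · subst hz
      rw [show ((0:Nat):Int) = 0 from rfl, digitsA_zero_of_nonpos 0 le_rfl]
      rfl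
    · rw [digitsA_step n hp, constructA_append,
        ih (n / 10) (Nat.div_lt_self hp (by norm_num))]
      push_cast
      omega

-- === skipping values below min_val ===

theorem Sfil_step (min_val max_val : Int) (L : Nat) (h : (fN L : Int) < min_val) :
    Sfil min_val max_val L = Sfil min_val max_val (L + 1) := by
  unfold Sfil
  rw [concatS]
  split
  · rw [List.filter_cons]
    simp only [decide_eq_true_eq]
    rw [if_neg (by omega)]
  · rename_i hgt
    rw [concatS, if_neg (by
      have := fN_lt_succ L
      have h2 : (fN L : Int) < (fN (L + 1) : Int) := by exact_mod_cast this
      omega)]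

theorem Sfil_skip (min_val max_val : Int) :
    ∀ (j L : Nat), (∀ K, L ≤ K → K < L + j → (fN K : Int) < min_val) →
      Sfil min_val max_val L = Sfil min_val max_val (L + j) := by
  intro j
  induction j with
  | zero => intro L _; rfl
  | succ j ih =>
    intro L hK
    rw [Sfil_step min_val max_val L (hK L le_rfl (by omega)),
      ih (L + 1) (fun K h1 h2 => hK K (by omega) (by omega))]
    congr 1
    omega

-- all left halves strictly below A's starting left half give concats below min_val
theorem fN_lt_of_lt_L0 (n : Nat) (hn : 1 ≤ n) :
    ∀ K, K < n / 10 ^ (ndP n - ndP n / 2) → fN K < n := by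
  intro K hK
  obtain ⟨b1, b2⟩ := ndP_bounds n hn
  have hndpos : 1 ≤ ndP n := by
    by_contra hc
    have h0 : ndP n = 0 := by omega
    rw [h0, pow_zero] at b2
    omega
  have hDpos : 0 < (10:Nat) ^ (ndP n - ndP n / 2) := Nat.pow_pos (by norm_num)
  have hL0 : n / 10 ^ (ndP n - ndP n / 2) < 10 ^ (ndP n / 2) := by
    rw [Nat.div_lt_iff_lt_mul hDpos, ← pow_add]
    have he : ndP n / 2 + (ndP n - ndP n / 2) = ndP n := by omega
    rw [he]
    exact b2
  rcases Nat.eq_zero_or_pos K with hKz | hKp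
  · subst hKz
    have : fN 0 = 0 := by unfold fN; rw [ndP_zero]; rfl
    omega
  · obtain ⟨e1, e2⟩ := ndP_bounds K hKp
    have hepos : 1 ≤ ndP K := by
      by_contra hc
      have h0 : ndP K = 0 := by omega
      rw [h0, pow_zero] at e2
      omega
    have hele : ndP K ≤ ndP n / 2 := by
      by_contra hc
      have : 10 ^ (ndP n / 2) ≤ 10 ^ (ndP K - 1) :=
        Nat.pow_le_pow_right (by norm_num) (by omega)
      omega
    rcases Nat.lt_or_ge (ndP K) (ndP n / 2) with hlt | hge
    · have hfK : fN K < 10 ^ ndP K * 10 ^ ndP K := by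
        unfold fN
        have h10 : 1 ≤ (10:Nat) ^ ndP K := Nat.one_le_pow _ _ (by norm_num)
        obtain ⟨m, hm⟩ : ∃ m, (10:Nat) ^ ndP K = m + 1 := ⟨10 ^ ndP K - 1, by omega⟩
        rw [hm]
        have hKm : K ≤ m := by omega
        nlinarith
      have hexp : 10 ^ ndP K * 10 ^ ndP K ≤ 10 ^ (ndP n - 1) := by
        rw [← pow_add]
        exact Nat.pow_le_pow_right (by norm_num) (by omega)
      omega
    · have hepos2 : ndP K = ndP n / 2 := by omega
      have hK1 : (K + 1) * 10 ^ (ndP n - ndP n / 2) ≤ n := by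
        rw [← Nat.le_div_iff_mul_le hDpos]
        omega
      have hstep : fN K < (K + 1) * 10 ^ (ndP n / 2) := by
        unfold fN
        rw [hepos2]
        have hKlt : K < 10 ^ (ndP n / 2) := by omega
        nlinarith
      have hmono : (K + 1) * 10 ^ (ndP n / 2) ≤ (K + 1) * 10 ^ (ndP n - ndP n / 2) :=
        Nat.mul_le_mul_left _ (Nat.pow_le_pow_right (by norm_num) (by omega))
      omega

-- === A equals the canonical enumeration ===

theorem A_eq_loop (min_val max_val : Int) (L : Nat)
    (hleft : constructA (List.take ((get_digitsA min_val).length / 2) (get_digitsA min_val)) =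
      ((L : Nat) : Int))
    (hpos : (get_digitsA min_val).length / 2 = ndP L) :
    get_invalid_ids min_val max_val = Sfil min_val max_val L := by
  unfold get_invalid_ids
  refine Eq.trans (loopA_congr min_val max_val [] _ _ ((L : Nat) : Int) ((10:Int) ^ ndP L)
    _ _ hleft (by rw [hpos])) ?_
  refine Eq.trans (loopA_char min_val max_val ((max_val + 1 - (fN L : Int)).toNat) L [] _ _ le_rfl) ?_
  simp

theorem A_eq_S (min_val max_val : Int) :
    get_invalid_ids min_val max_val = Sfil min_val max_val 0 := by
  by_cases hmin : min_val ≤ 0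
  · exact A_eq_loop min_val max_val 0
      (by rw [digitsA_zero_of_nonpos min_val hmin]; rfl)
      (by rw [digitsA_zero_of_nonpos min_val hmin, ndP_zero]; rfl)
  · have hmin' : 0 < min_val := by omega
    have hn : min_val = ((min_val.toNat : Nat) : Int) := by omega
    have hn1 : 1 ≤ min_val.toNat := by omega
    obtain ⟨b1, b2⟩ := ndP_bounds min_val.toNat hn1
    have hndpos : 1 ≤ ndP min_val.toNat := by
      by_contra hc
      have h0 : ndP min_val.toNat = 0 := by omega
      rw [h0, pow_zero] at b2
      omega
    have hDpos : 0 < (10:Nat) ^ (ndP min_val.toNat - ndP min_val.toNat / 2) :=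
      Nat.pow_pos (by norm_num)
    have hpos2 : ndP min_val.toNat / 2 =
        ndP (min_val.toNat / 10 ^ (ndP min_val.toNat - ndP min_val.toNat / 2)) := by
      rcases Nat.eq_zero_or_pos (ndP min_val.toNat / 2) with hz | hp
      · have hL0z : min_val.toNat / 10 ^ (ndP min_val.toNat - ndP min_val.toNat / 2) = 0 := by
          have hsub : ndP min_val.toNat - ndP min_val.toNat / 2 = ndP min_val.toNat := by omega
          rw [hsub]
          exact Nat.div_eq_of_lt b2
        rw [hL0z, ndP_zero, hz]
      · have hlow : 10 ^ (ndP min_val.toNat / 2 - 1) ≤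
            min_val.toNat / 10 ^ (ndP min_val.toNat - ndP min_val.toNat / 2) := by
          rw [Nat.le_div_iff_mul_le hDpos, ← pow_add]
          have he : ndP min_val.toNat / 2 - 1 + (ndP min_val.toNat - ndP min_val.toNat / 2) =
              ndP min_val.toNat - 1 := by omega
          rw [he]
          exact b1
        have hhigh : min_val.toNat / 10 ^ (ndP min_val.toNat - ndP min_val.toNat / 2) <
            10 ^ (ndP min_val.toNat / 2) := by
          rw [Nat.div_lt_iff_lt_mul hDpos, ← pow_add]
          have he : ndP min_val.toNat / 2 + (ndP min_val.toNat - ndP min_val.toNat / 2) =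
              ndP min_val.toNat := by omega
          rw [he]
          exact b2
        have := ndP_eq_of_bounds
          (min_val.toNat / 10 ^ (ndP min_val.toNat - ndP min_val.toNat / 2))
          (ndP min_val.toNat / 2 - 1) hlow
          (by
            have he : ndP min_val.toNat / 2 - 1 + 1 = ndP min_val.toNat / 2 := by omega
            rw [he]
            exact hhigh)
        omega
    rw [A_eq_loop min_val max_val
        (min_val.toNat / 10 ^ (ndP min_val.toNat - ndP min_val.toNat / 2))
        (by
          conv_lhs => rw [hn]
          rw [digitsA_length, digitsA_take min_val.toNat (ndP min_val.toNat / 2) (by omega),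
            constructA_digits])
        (by
          conv_lhs => rw [hn]
          rw [digitsA_length]
          exact hpos2)]
    have hskip := Sfil_skip min_val max_val
      (min_val.toNat / 10 ^ (ndP min_val.toNat - ndP min_val.toNat / 2)) 0
      (by
        intro K h1 h2
        have := fN_lt_of_lt_L0 min_val.toNat hn1 K (by omega)
        omega)
    rw [hskip]
    congr 1
    omega

-- === B-side characterization ===

theorem cmin_le_iff (min_val R x : Int) (hR : 0 < R) :
    -(PySem.Int.floordiv (-min_val) R) ≤ x ↔ min_val ≤ x * R := by
  rw [neg_le, PySem.Int.le_floordiv_iff_mul_le hR, neg_mul, neg_le_neg_iff]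

theorem le_high_iff (max_val R x : Int) (hR : 0 < R) :
    x ≤ PySem.Int.floordiv max_val R ↔ x * R ≤ max_val := by
  rw [← not_lt, PySem.Int.floordiv_lt_iff_lt_mul hR, not_lt]

theorem ndP_pow (d : Nat) : ndP (10 ^ d) = d + 1 :=
  ndP_eq_of_bounds _ d le_rfl (Nat.pow_lt_pow_right (by norm_num) (by omega))

theorem ndP_block (d L : Nat) (hd : 1 ≤ d) (h1 : 10 ^ (d - 1) ≤ L) (h2 : L < 10 ^ d) :
    ndP L = d := by
  have := ndP_eq_of_bounds L (d - 1) h1 (by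
    have he : d - 1 + 1 = d := by omega
    rw [he]
    exact h2)
  omega

theorem fN_block_cast (d L : Nat) (hndL : ndP L = d) :
    (fN L : Int) = (L : Int) * ((10:Int) ^ d + 1) := by
  unfold fN
  rw [hndL]
  push_cast
  ring

theorem SB_block (min_val max_val : Int) (d : Nat) (hd : 1 ≤ d) :
    ∀ (k : Nat) (L : Nat), 10 ^ d - L ≤ k → 10 ^ (d - 1) ≤ L → L ≤ 10 ^ d →
      Sfil min_val max_val L =
        (PySem.List.pyRange
            (max ((L : Nat) : Int) (-(PySem.Int.floordiv (-min_val) (10 ^ d + 1))))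
            (min ((10:Int) ^ d - 1) (PySem.Int.floordiv max_val (10 ^ d + 1)) + 1) 1).map
          (fun left => left * (10 ^ d + 1)) ++ Sfil min_val max_val (10 ^ d) := by
  have hR : (0:Int) < 10 ^ d + 1 := by positivity
  have hcast : (((10:Nat) ^ d : Nat) : Int) = (10:Int) ^ d := by push_cast; ring
  intro k
  induction k with
  | zero =>
    intro L hk hlo hhi
    have hLe : L = 10 ^ d := by omega
    subst hLe
    rw [PySem.List.pyRange_one_eq_nil (by
      have h1 := min_le_left ((10:Int) ^ d - 1) (PySem.Int.floordiv max_val (10 ^ d + 1))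
      have h2 := le_max_left ((10 ^ d : Nat) : Int)
        (-(PySem.Int.floordiv (-min_val) (10 ^ d + 1)))
      rw [hcast] at h2
      omega)]
    simp
  | succ k ih =>
    intro L hk hlo hhi
    rcases Nat.eq_or_lt_of_le hhi with hLe | hLlt
    · subst hLe
      rw [PySem.List.pyRange_one_eq_nil (by
        have h1 := min_le_left ((10:Int) ^ d - 1) (PySem.Int.floordiv max_val (10 ^ d + 1))
        have h2 := le_max_left ((10 ^ d : Nat) : Int)
          (-(PySem.Int.floordiv (-min_val) (10 ^ d + 1)))
        rw [hcast] at h2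
        omega)]
      simp
    · have hndL : ndP L = d := ndP_block d L hd hlo hLlt
      have hfL : (fN L : Int) = (L : Int) * ((10:Int) ^ d + 1) := fN_block_cast d L hndL
      have hLltI : (L : Int) < (10:Int) ^ d := by exact_mod_cast hLlt
      by_cases hmax : (fN L : Int) ≤ max_val
      · have hhighL : (L : Int) ≤ PySem.Int.floordiv max_val (10 ^ d + 1) :=
          (le_high_iff max_val _ _ hR).2 (by rw [← hfL]; exact hmax)
        by_cases hmin : min_val ≤ (fN L : Int)
        · have hcminL : -(PySem.Int.floordiv (-min_val) (10 ^ d + 1)) ≤ (L : Int) :=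
            (cmin_le_iff min_val _ _ hR).2 (by rw [← hfL]; exact hmin)
          have hmaxL : max ((L : Nat) : Int)
              (-(PySem.Int.floordiv (-min_val) (10 ^ d + 1))) = (L : Int) :=
            max_eq_left hcminL
          have hcons : (min ((10:Int) ^ d - 1) (PySem.Int.floordiv max_val (10 ^ d + 1)) + 1) >
              (L : Int) := by omega
          rw [Sfil_cons min_val max_val L hmax, if_pos hmin, hmaxL,
            PySem.List.pyRange_one_cons hcons, List.map_cons,
            ih (L + 1) (by omega) (by omega) (by omega)]
          have hmaxL1 : max (((L + 1 : Nat) : Nat) : Int)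
              (-(PySem.Int.floordiv (-min_val) (10 ^ d + 1))) = (L : Int) + 1 := by
            rw [max_eq_left (by push_cast; omega)]
            push_cast
            ring
          rw [hmaxL1, hfL]
          simp
        · have hcminL : ¬ (-(PySem.Int.floordiv (-min_val) (10 ^ d + 1)) ≤ (L : Int)) := by
            intro hc
            exact hmin (by rw [hfL]; exact (cmin_le_iff min_val _ _ hR).1 hc)
          rw [Sfil_step min_val max_val L (by omega),
            ih (L + 1) (by omega) (by omega) (by omega)]
          have hm1 : max ((L : Nat) : Int)
              (-(PySem.Int.floordiv (-min_val) (10 ^ d + 1))) =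
              -(PySem.Int.floordiv (-min_val) (10 ^ d + 1)) := max_eq_right (by omega)
          have hm2 : max (((L + 1 : Nat) : Nat) : Int)
              (-(PySem.Int.floordiv (-min_val) (10 ^ d + 1))) =
              -(PySem.Int.floordiv (-min_val) (10 ^ d + 1)) := by
            rcases le_total (((L + 1 : Nat) : Nat) : Int)
              (-(PySem.Int.floordiv (-min_val) (10 ^ d + 1))) with hc | hc
            · exact max_eq_right hc
            · push_cast at hc
              omega
          rw [hm1, hm2]
      · have hhighL : PySem.Int.floordiv max_val (10 ^ d + 1) < (L : Int) := by
          by_contra hc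
          exact hmax (by
            rw [hfL]
            exact (le_high_iff max_val _ _ hR).1 (by omega))
        have hnil1 : Sfil min_val max_val L = [] := Sfil_nil min_val max_val L hmax
        have hnil2 : Sfil min_val max_val (10 ^ d) = [] := by
          apply Sfil_nil
          have hmono := fN_mono L (10 ^ d) (by omega)
          have hmono' : (fN L : Int) ≤ (fN (10 ^ d) : Int) := by exact_mod_cast hmono
          omega
        rw [hnil1, hnil2, PySem.List.pyRange_one_eq_nil (by
          have h1 := min_le_right ((10:Int) ^ d - 1) (PySem.Int.floordiv max_val (10 ^ d + 1))
          have h2 := le_max_left ((L : Nat) : Int)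
            (-(PySem.Int.floordiv (-min_val) (10 ^ d + 1)))
          omega)]
        simp

theorem loopB_char (min_val max_val : Int) :
    ∀ (k : Nat) (d : Nat) (hd : 1 ≤ d) (res : List Int),
      (max_val + 1 - (10:Int) ^ (d - 1) * (10 ^ d + 1)).toNat ≤ k →
      loopB min_val max_val res d hd = res ++ Sfil min_val max_val (10 ^ (d - 1)) := by
  intro k
  induction k with
  | zero =>
    intro d hd res hk
    have hnd : ndP (10 ^ (d - 1)) = d := by
      rw [ndP_pow]
      omega
    have hg : (fN (10 ^ (d - 1)) : Int) = (10:Int) ^ (d - 1) * (10 ^ d + 1) := by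
      rw [fN_block_cast d _ hnd]
      push_cast
      ring
    have hgt : ¬ ((10:Int) ^ (d - 1) * (10 ^ d + 1) ≤ max_val) := by omega
    rw [loopB, dif_neg hgt, Sfil_nil min_val max_val _ (by rw [hg]; exact hgt)]
    simp
  | succ k ih =>
    intro d hd res hk
    by_cases hle : (10:Int) ^ (d - 1) * (10 ^ d + 1) ≤ max_val
    · rw [loopB, dif_pos hle,
        ih (d + 1) (by omega) _ (by
          have := gB_strict d hd
          omega)]
      have hnd : ndP (10 ^ (d - 1)) = d := by
        rw [ndP_pow]
        omega
      have hblock := SB_block min_val max_val d hd (10 ^ d - 10 ^ (d - 1)) (10 ^ (d - 1))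
        le_rfl le_rfl (Nat.pow_le_pow_right (by norm_num) (by omega))
      have hcast : (((10:Nat) ^ (d - 1) : Nat) : Int) = (10:Int) ^ (d - 1) := by
        push_cast
        ring
      rw [hcast] at hblock
      have hd1 : d + 1 - 1 = d := by omega
      rw [hd1, List.append_assoc, ← hblock]
    · rw [loopB, dif_neg hle]
      have hnd : ndP (10 ^ (d - 1)) = d := by
        rw [ndP_pow]
        omega
      have hg : (fN (10 ^ (d - 1)) : Int) = (10:Int) ^ (d - 1) * (10 ^ d + 1) := by
        rw [fN_block_cast d _ hnd]
        push_cast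
        ring
      rw [Sfil_nil min_val max_val _ (by rw [hg]; exact hle)]
      simp

theorem B_eq_S (min_val max_val : Int) :
    get_invalid_ids_alt min_val max_val = Sfil min_val max_val 0 := by
  unfold get_invalid_ids_alt
  rw [loopB_char min_val max_val
    ((max_val + 1 - (10:Int) ^ (1 - 1) * (10 ^ 1 + 1)).toNat) 1 le_rfl _ le_rfl]
  have hf0 : (fN 0 : Int) = 0 := by
    unfold fN
    rw [ndP_zero]
    norm_num
  have hnd1 : ndP 1 = 1 := ndP_eq_of_bounds 1 0 (by norm_num) (by norm_num)
  have hf1 : (fN 1 : Int) = 11 := by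
    unfold fN
    rw [hnd1]
    norm_num
  by_cases hmax : (0:Int) ≤ max_val
  · rw [Sfil_cons min_val max_val 0 (by omega), hf0]
    by_cases hmin : min_val ≤ 0
    · rw [if_pos (⟨hmin, hmax⟩ : min_val ≤ 0 ∧ 0 ≤ max_val), if_pos hmin]
      norm_num
    · rw [if_neg (by omega : ¬ (min_val ≤ 0 ∧ 0 ≤ max_val)), if_neg (by omega)]
      norm_num
  · rw [Sfil_nil min_val max_val 0 (by omega),
      Sfil_nil min_val max_val (10 ^ (1 - 1)) (by
        have : (10:Nat) ^ (1 - 1) = 1 := by norm_num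
        rw [this]
        omega),
      if_neg (by omega : ¬ (min_val ≤ 0 ∧ 0 ≤ max_val))]
    rfl

-- ===== VERDICT (by name: the statement is the Claim_ definition above) =====
theorem get_invalid_ids_spec : Claim_equal_get_invalid_ids := by
  intro min_val max_val _
  unfold Spec_get_invalid_ids
  rw [A_eq_S, B_eq_S]
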